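-- pv_equiv track=rewrite | github.com/MihirRajak91/SDS-RAG | src/sds_rag/services/extraction_service.py | _is_valid_table_structure
-- ===== SOURCE A (Python) =====
-- from typing import List, Dict, Any
--
-- def _is_valid_table_structure(table: List[List[str]]) -> bool:
--     """
--     Basic validation for table structure.
--
--     Args:
--         table (List[List[str]]): Table data to validate
--
--     Returns:
--         bool: True if table has valid structure, False otherwise
--     """
--     if not table or len(table) < 1:
--         return False
--
--     non_empty_rows = [row for row in table if row and any(cell and cell.strip() for cell in row)]
--     if len(non_empty_rows) < 1:
--         return False
--
--     has_multiple_cols = any(len([cell for cell in row if cell and cell.strip()]) >= 2 for row in non_empty_rows)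
--     return has_multiple_cols
-- ===== SOURCE B (Python) =====
-- from typing import List, Dict, Any
--
-- def _is_valid_table_structure(table: List[List[str]]) -> bool:
--     """True iff some row contains two non-blank cells, found by consuming a
--     shared iterator twice: the first any() advances to the first non-blank
--     cell, the second any() looks for another one in what remains."""
--     for row in table:
--         cells = iter(row)
--         if any(c and c.strip() for c in cells) and any(c and c.strip() for c in cells):
--             return True
--     return False
-- ===== Notes on version B (the rewrite author's own statement) =====
-- stated objective: idiomatic
-- what changed: Instead of A's filter-rows pass followed by a per-row filtered-list length count, B searches each row for a first and then a second non-blank cell by running two short-circuiting any() passes over one shared iterator, with no intermediate lists, no counting and no row pre-filter.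
import Mathlib
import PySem

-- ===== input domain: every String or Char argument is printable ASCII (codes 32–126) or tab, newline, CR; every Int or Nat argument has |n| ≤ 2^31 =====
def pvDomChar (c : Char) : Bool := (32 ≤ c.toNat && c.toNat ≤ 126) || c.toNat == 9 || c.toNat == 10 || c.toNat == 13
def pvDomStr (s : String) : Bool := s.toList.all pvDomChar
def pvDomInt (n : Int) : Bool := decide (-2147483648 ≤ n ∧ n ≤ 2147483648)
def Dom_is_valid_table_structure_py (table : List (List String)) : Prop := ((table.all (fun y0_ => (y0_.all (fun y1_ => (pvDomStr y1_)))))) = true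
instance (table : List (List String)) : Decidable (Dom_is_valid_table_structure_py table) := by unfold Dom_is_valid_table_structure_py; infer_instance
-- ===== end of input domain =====

-- B replaces A's filter-then-count passes by two short-circuiting any() scans over
-- one shared per-row iterator (find a first, then a second non-blank cell); same
-- return value, no speed claim.
-- ===== PORT A =====
-- truthiness of `cell and cell.strip()`
def pvCellOk (c : String) : Bool := decide (c ≠ "") && decide (PySem.Str.strip c ≠ "")

def is_valid_table_structure_py (table : List (List String)) : Bool :=
  if table.isEmpty || table.length < 1 then false
  else
    let non_empty_rows := table.filter (fun row => !row.isEmpty && row.any pvCellOk)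
    if non_empty_rows.length < 1 then false
    else non_empty_rows.any (fun row => decide ((row.filter pvCellOk).length ≥ 2))

-- ===== PORT B =====
-- the two chained any() over one shared iterator: the first any consumes cells up to
-- and including the first non-blank one; the second any scans the remainder
def pvTwoNonBlank : List String → Bool
  | [] => false
  | c :: rest => if pvCellOk c then rest.any pvCellOk else pvTwoNonBlank rest

def is_valid_table_structure_py_alt (table : List (List String)) : Bool :=
  table.any pvTwoNonBlank

-- ===== PRECONDITION & SPEC =====
def Spec_is_valid_table_structure_py (table : List (List String)) (out : Bool) : Prop := out = is_valid_table_structure_py_alt table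
instance (table : List (List String)) (out : Bool) : Decidable (Spec_is_valid_table_structure_py table out) := by unfold Spec_is_valid_table_structure_py; infer_instance

-- ===== CLAIM (what is proved, stated in full; the proofs are below) =====
def Claim_equal_is_valid_table_structure_py : Prop := ∀ (table : List (List String)), Dom_is_valid_table_structure_py table → Spec_is_valid_table_structure_py table (is_valid_table_structure_py table)

-- ===== LEMMAS AND PROOFS =====

lemma any_eq_filter_len (row : List String) :
    row.any pvCellOk = decide ((row.filter pvCellOk).length ≥ 1) := by
  rcases hf : row.filter pvCellOk with _ | ⟨c, cs⟩
  · simp [List.any_eq_false]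
    intro x hx
    have hnm : x ∉ row.filter pvCellOk := by rw [hf]; simp
    cases hok : pvCellOk x with
    | false => rfl
    | true => exact absurd (List.mem_filter.mpr ⟨hx, hok⟩) hnm
  · have hc : c ∈ row.filter pvCellOk := by rw [hf]; exact List.mem_cons_self
    have := List.mem_filter.mp hc
    simp only [List.length_cons, ge_iff_le, Nat.le_add_left, decide_true]
    exact List.any_eq_true.mpr ⟨c, this.1, this.2⟩

lemma pvTwoNonBlank_eq (row : List String) :
    pvTwoNonBlank row = decide ((row.filter pvCellOk).length ≥ 2) := by
  induction row with
  | nil => simp [pvTwoNonBlank]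
  | cons c rest ih =>
    by_cases h : pvCellOk c = true
    · simp only [pvTwoNonBlank, h, if_true, List.filter_cons_of_pos h,
        List.length_cons, any_eq_filter_len]
      exact decide_eq_decide.mpr (by omega)
    · simp [pvTwoNonBlank, h, List.filter_cons_of_neg, ih]

lemma filter_two_nonempty {row : List String}
    (h : (row.filter pvCellOk).length ≥ 2) :
    (!row.isEmpty && row.any pvCellOk) = true := by
  rcases hf : row.filter pvCellOk with _ | ⟨c, cs⟩
  · rw [hf] at h; simp at h
  · have hc : c ∈ row.filter pvCellOk := by rw [hf]; exact List.mem_cons_self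
    have := List.mem_filter.mp hc
    simp only [Bool.and_eq_true, List.any_eq_true]
    exact ⟨by simp; rintro rfl; simp at this, ⟨c, this.1, this.2⟩⟩

lemma any_filter_absorb (table : List (List String)) :
    (table.filter (fun row => !row.isEmpty && row.any pvCellOk)).any
        (fun row => decide ((row.filter pvCellOk).length ≥ 2)) =
      table.any (fun row => decide ((row.filter pvCellOk).length ≥ 2)) := by
  rw [List.any_filter]
  congr 1
  funext row
  by_cases h2 : (row.filter pvCellOk).length ≥ 2
  · rw [filter_two_nonempty h2]; simp
  · simp [h2]

-- ===== VERDICT (by name: the statement is the Claim_ definition above) =====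
theorem is_valid_table_structure_py_spec : Claim_equal_is_valid_table_structure_py := by
  intro table _
  unfold Spec_is_valid_table_structure_py
  unfold is_valid_table_structure_py is_valid_table_structure_py_alt
  have halt : table.any pvTwoNonBlank
      = table.any (fun row => decide ((row.filter pvCellOk).length ≥ 2)) := by
    exact congrArg table.any (funext pvTwoNonBlank_eq)
  rw [halt]
  by_cases hT : table.isEmpty
  · have : table = [] := List.isEmpty_iff.mp hT
    subst this; simp
  · have hne : table ≠ [] := by simpa [List.isEmpty_iff] using hT
    have hcond : (table.isEmpty || decide (table.length < 1)) = false := by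
      simp [hT, List.length_eq_zero_iff]
      exact hne
    rw [hcond]
    simp only [Bool.false_eq_true, if_false]
    by_cases hE : (table.filter (fun row => !row.isEmpty && row.any pvCellOk)).length < 1
    · have hf : table.filter (fun row => !row.isEmpty && row.any pvCellOk) = [] :=
        List.length_eq_zero_iff.mp (by omega)
      rw [if_pos hE]
      symm
      rw [List.any_eq_false]
      intro row hmem
      by_contra hc
      simp only [decide_eq_true_eq] at hc
      have : row ∈ table.filter (fun row => !row.isEmpty && row.any pvCellOk) :=
        List.mem_filter.mpr ⟨hmem, filter_two_nonempty hc⟩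
      rw [hf] at this; simp at this
    · rw [if_neg hE]
      exact any_filter_absorb table
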